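-- pv_equiv track=rewrite | github.com/gabriellaec/desoft-analise-exercicios | backup/user_173/ch153_2020_06_21_00_24_21_618109.py | agrupa_por_idade
-- ===== SOURCE A (Python) =====
-- def agrupa_por_idade(dic):
--     dic2 = {'criança':[],'adolescente':[],'adulto':[],'idoso':[]}
--     for nome,idade in dic.items():
--         if idade <= 11:
--             dic2['criança'].append(nome)
--         elif idade >= 12 and idade <= 17:
--             dic2['adolescente'].append(nome)
--         elif idade >= 18 and idade <= 59:
--             dic2['adulto'].append(nome)
--         else:
--             dic2['idoso'].append(nome)
--     return dic2
-- ===== SOURCE B (Python) =====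
-- def agrupa_por_idade(dic):
--     categorias = ['criança', 'adolescente', 'adulto', 'idoso']
--     limites = [12, 18, 60]
--     dic2 = {c: [] for c in categorias}
--     for nome, idade in dic.items():
--         lo, hi = 0, len(limites)
--         while lo < hi:
--             mid = (lo + hi) // 2
--             if idade < limites[mid]:
--                 hi = mid
--             else:
--                 lo = mid + 1
--         dic2[categorias[lo]].append(nome)
--     return dic2
-- ===== Notes on version B (the rewrite author's own statement) =====
-- stated objective: alternative
-- what changed: Replaces A's if/elif range cascade with a boundary table [12,18,60] plus a binary-search (bisect_right) dispatch into a parallel category list, over a comprehension-initialized result dict.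
import Mathlib
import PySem

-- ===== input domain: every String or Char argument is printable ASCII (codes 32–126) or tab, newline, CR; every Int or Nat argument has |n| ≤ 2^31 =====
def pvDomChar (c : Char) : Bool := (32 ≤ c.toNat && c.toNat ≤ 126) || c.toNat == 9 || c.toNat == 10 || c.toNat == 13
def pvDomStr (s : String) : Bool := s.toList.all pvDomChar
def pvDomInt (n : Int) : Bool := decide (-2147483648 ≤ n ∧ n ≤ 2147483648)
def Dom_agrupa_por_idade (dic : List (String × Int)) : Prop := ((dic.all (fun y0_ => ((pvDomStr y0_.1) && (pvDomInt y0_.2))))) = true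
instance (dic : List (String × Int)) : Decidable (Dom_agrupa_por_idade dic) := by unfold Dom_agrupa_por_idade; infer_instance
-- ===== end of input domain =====

-- B replaces A's if/elif range cascade with a boundary table [12,18,60] plus a hand-written
-- binary-search (bisect_right) dispatch into a parallel category list; same O(n) cost, alternative structure.


-- ===== PORT A =====
def agrupa_por_idade (dic : List (String × Int)) : List (String × List String) :=
  let init : PySem.Dict String (List String) :=
    PySem.Dict.ofList [("criança", []), ("adolescente", []), ("adulto", []), ("idoso", [])]
  (dic.foldl (fun dic2 p =>
      if p.2 ≤ 11 then dic2.modify "criança" [] (· ++ [p.1])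
      else if 12 ≤ p.2 ∧ p.2 ≤ 17 then dic2.modify "adolescente" [] (· ++ [p.1])
      else if 18 ≤ p.2 ∧ p.2 ≤ 59 then dic2.modify "adulto" [] (· ++ [p.1])
      else dic2.modify "idoso" [] (· ++ [p.1])) init).items

-- ===== PORT B =====
-- the 'while lo < hi' binary search of Source B, with fuel = hi - lo (the loop halves the gap each turn)
def bisectLoop (limites : List Int) (x : Int) : Nat → Nat → Nat → Nat
  | 0, lo, _ => lo
  | fuel+1, lo, hi =>
    if lo < hi then
      let mid := (lo + hi) / 2
      if x < limites.getD mid 0 then bisectLoop limites x fuel lo mid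
      else bisectLoop limites x fuel (mid+1) hi
    else lo

def agrupa_por_idade_alt (dic : List (String × Int)) : List (String × List String) :=
  let categorias : List String := ["criança", "adolescente", "adulto", "idoso"]
  let limites : List Int := [12, 18, 60]
  let init : PySem.Dict String (List String) :=
    PySem.Dict.ofList (categorias.map (fun c => (c, [])))
  (dic.foldl (fun dic2 p =>
      let lo := bisectLoop limites p.2 limites.length 0 limites.length
      -- categorias[lo]: lo ≤ 3 here, always in range, so getD is exact
      dic2.modify (categorias.getD lo "") [] (· ++ [p.1])) init).items

-- ===== PRECONDITION & SPEC =====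
def Spec_agrupa_por_idade (dic : List (String × Int)) (out : List (String × List String)) : Prop := out = agrupa_por_idade_alt dic
instance (dic : List (String × Int)) (out : List (String × List String)) : Decidable (Spec_agrupa_por_idade dic out) := by unfold Spec_agrupa_por_idade; infer_instance

-- ===== CLAIM (what is proved, stated in full; the proofs are below) =====
def Claim_equal_agrupa_por_idade : Prop := ∀ (dic : List (String × Int)), Dom_agrupa_por_idade dic → Spec_agrupa_por_idade dic (agrupa_por_idade dic)

-- ===== LEMMAS AND PROOFS =====

-- the binary search over the boundary table picks exactly the key A's cascade picks
lemma key_eq (i : Int) :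
    (["criança","adolescente","adulto","idoso"].getD (bisectLoop [12,18,60] i 3 0 3) "")
      = (if i ≤ 11 then "criança"
         else if 12 ≤ i ∧ i ≤ 17 then "adolescente"
         else if 18 ≤ i ∧ i ≤ 59 then "adulto"
         else "idoso") := by
  simp only [bisectLoop]
  norm_num
  split_ifs <;> simp_all <;> omega

lemma step_eq (dic2 : PySem.Dict String (List String)) (p : String × Int) :
    dic2.modify (["criança","adolescente","adulto","idoso"].getD
        (bisectLoop [12,18,60] p.2 3 0 3) "") [] (· ++ [p.1])
      = (if p.2 ≤ 11 then dic2.modify "criança" [] (· ++ [p.1])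
         else if 12 ≤ p.2 ∧ p.2 ≤ 17 then dic2.modify "adolescente" [] (· ++ [p.1])
         else if 18 ≤ p.2 ∧ p.2 ≤ 59 then dic2.modify "adulto" [] (· ++ [p.1])
         else dic2.modify "idoso" [] (· ++ [p.1])) := by
  rw [key_eq]
  split_ifs <;> rfl

-- ===== VERDICT (by name: the statement is the Claim_ definition above) =====
theorem agrupa_por_idade_spec : Claim_equal_agrupa_por_idade := by
  intro dic _
  unfold Spec_agrupa_por_idade agrupa_por_idade agrupa_por_idade_alt
  simp only [List.map, List.length]
  congr 1
  apply PySem.List.foldl_congr_mem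
  intro dic2 p _
  exact (step_eq dic2 p).symm
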